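-- pv_equiv track=rewrite | github.com/lililaprof/lecture-coloree | app.py | ajouter_espaces_entre_mots
-- ===== SOURCE A (Python) =====
-- def ajouter_espaces_entre_mots(texte):
--     resultat = ""
--     for i, char in enumerate(texte):
--         if char == ' ':
--             if i > 0 and texte[i-1] != ' ':
--                 resultat += '  '
--             elif i == 0:
--                 resultat += '  '
--         else:
--             resultat += char
--     return resultat
-- ===== SOURCE B (Python) =====
-- def ajouter_espaces_entre_mots(texte):
--     parts = []
--     i, n = 0, len(texte)
--     while i < n:
--         if texte[i] == ' ':
--             parts.append('  ')
--             while i < n and texte[i] == ' ':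
--                 i += 1
--         else:
--             parts.append(texte[i])
--             i += 1
--     return ''.join(parts)
-- ===== Notes on version B (the rewrite author's own statement) =====
-- stated objective: alternative
-- what changed: Replaced A's per-character enumerate loop that re-indexes the string to peek at the previous character with a single while-loop scan that emits a double space once per maximal run of spaces and skips the whole run, joining collected pieces at the end.
import Mathlib
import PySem

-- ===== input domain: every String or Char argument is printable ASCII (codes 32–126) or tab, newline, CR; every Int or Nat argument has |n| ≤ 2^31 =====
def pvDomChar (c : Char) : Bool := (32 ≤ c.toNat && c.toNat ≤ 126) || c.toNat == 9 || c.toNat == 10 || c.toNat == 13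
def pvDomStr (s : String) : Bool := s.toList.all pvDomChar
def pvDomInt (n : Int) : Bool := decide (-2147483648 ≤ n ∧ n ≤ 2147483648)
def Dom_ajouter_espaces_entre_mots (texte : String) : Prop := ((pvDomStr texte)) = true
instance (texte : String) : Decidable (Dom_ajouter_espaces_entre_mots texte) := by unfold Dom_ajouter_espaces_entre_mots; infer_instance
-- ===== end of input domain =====

-- B replaces A's per-character fold (which re-indexes the string to peek at the previous
-- character) by a single run-skipping scan: each maximal run of spaces emits '  ' once;
-- objective: alternative (same O(n) cost, plainer control flow).


-- ===== PORT A =====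
-- Literal port of A: fold over enumerate(texte); on a space, peek at texte[i-1].
def ajouter_espaces_entre_mots (texte : String) : String :=
  String.ofList <|
    (PySem.List.enumerate texte.toList 0).foldl
      (fun resultat (p : Int × Char) =>
        if p.2 = ' ' then
          if p.1 > 0 ∧ PySem.List.pyGet? texte.toList (p.1 - 1) ≠ some ' ' then
            resultat ++ [' ', ' ']
          else if p.1 = 0 then
            resultat ++ [' ', ' ']
          else resultat
        else resultat ++ [p.2]) []

-- ===== PORT B =====
-- Port of B's while-loop: on a space emit '  ' and skip the maximal run (the inner
-- while-loop is the dropWhile); otherwise copy the character.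
def ajouterAltGo : List Char → List Char
  | [] => []
  | c :: rest =>
    if c = ' ' then ' ' :: ' ' :: ajouterAltGo (rest.dropWhile (· = ' '))
    else c :: ajouterAltGo rest
termination_by l => l.length
decreasing_by
  · exact Nat.lt_succ_of_le (List.length_dropWhile_le _ _)
  · simp

def ajouter_espaces_entre_mots_alt (texte : String) : String :=
  String.ofList (ajouterAltGo texte.toList)

-- ===== PRECONDITION & SPEC =====
def Spec_ajouter_espaces_entre_mots (texte : String) (out : String) : Prop := out = ajouter_espaces_entre_mots_alt texte
instance (texte : String) (out : String) : Decidable (Spec_ajouter_espaces_entre_mots texte out) := by unfold Spec_ajouter_espaces_entre_mots; infer_instance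

-- ===== CLAIM (what is proved, stated in full; the proofs are below) =====
def Claim_equal_ajouter_espaces_entre_mots : Prop := ∀ (texte : String), Dom_ajouter_espaces_entre_mots texte → Spec_ajouter_espaces_entre_mots texte (ajouter_espaces_entre_mots texte)

-- ===== LEMMAS AND PROOFS =====

-- A's loop, rephrased with the previous character carried along instead of re-indexed.
def ajouterGoA : Option Char → List Char → List Char
  | _, [] => []
  | prev, c :: rest =>
    if c = ' ' then
      if prev = some ' ' then ajouterGoA (some ' ') rest
      else ' ' :: ' ' :: ajouterGoA (some ' ') rest
    else c :: ajouterGoA (some c) rest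

-- after a space, further spaces of the run are skipped
theorem ajouterGoA_space_dropWhile (l : List Char) :
    ajouterGoA (some ' ') l = ajouterGoA (some ' ') (l.dropWhile (· = ' ')) := by
  induction l with
  | nil => rfl
  | cons c rest ih =>
    by_cases hc : c = ' '
    · subst hc
      simpa [ajouterGoA, List.dropWhile] using ih
    · simp [List.dropWhile, hc]

-- the prev-carrying loop equals B's run-skipping scan whenever prev is not a space
theorem ajouterGoA_eq_altGo (l : List Char) (prev : Option Char) (h : prev ≠ some ' ') :
    ajouterGoA prev l = ajouterAltGo l := by
  induction hn : l.length using Nat.strong_induction_on generalizing l prev with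
  | _ n ih =>
  subst hn
  match l with
  | [] => cases prev <;> simp [ajouterGoA, ajouterAltGo]
  | c :: rest =>
    by_cases hc : c = ' '
    · subst hc
      rw [ajouterAltGo, ajouterGoA]
      simp only [if_neg h]
      rw [ajouterGoA_space_dropWhile]
      have hdw : ajouterGoA (some ' ') (rest.dropWhile (· = ' '))
          = ajouterAltGo (rest.dropWhile (· = ' ')) := by
        cases hdrop : rest.dropWhile (· = ' ') with
        | nil => simp [ajouterGoA, ajouterAltGo]
        | cons c' r' =>
          have hc' : ¬ (c' = ' ') := by
            have := List.head?_dropWhile_not (p := (· = ' ')) rest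
            rw [hdrop] at this
            simpa using this
          have hlen : r'.length < (' ' :: rest).length := by
            have h1 : (rest.dropWhile (· = ' ')).length ≤ rest.length :=
              List.length_dropWhile_le _ _
            rw [hdrop] at h1
            simp at h1 ⊢
            omega
          rw [ajouterGoA, ajouterAltGo]
          simp only [if_neg hc']
          exact congrArg (List.cons c') (ih r'.length hlen r' (some c') (by simpa using hc') rfl)
      rw [hdw]
      simp
    · have hlen : rest.length < (c :: rest).length := by simp
      rw [ajouterGoA, ajouterAltGo]
      simp only [if_neg hc]
      exact congrArg (List.cons c) (ih rest.length hlen rest (some c) (by simpa using hc) rfl)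

-- the body of A's foldl, named so the unrolling lemma can speak about it
def ajouterStepA (l : List Char) (resultat : List Char) (p : Int × Char) : List Char :=
  if p.2 = ' ' then
    if p.1 > 0 ∧ PySem.List.pyGet? l (p.1 - 1) ≠ some ' ' then resultat ++ [' ', ' ']
    else if p.1 = 0 then resultat ++ [' ', ' ']
    else resultat
  else resultat ++ [p.2]

-- texte[i-1] for i = len(pre) > 0 is the last character of the prefix
theorem ajouterPyGet_pre_last (pre suf : List Char) (h : pre ≠ []) :
    PySem.List.pyGet? (pre ++ suf) ((pre.length : Int) - 1) = pre.getLast? := by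
  have hpos : 0 < pre.length := List.length_pos_iff.mpr h
  have hidx : ((pre.length : Int) - 1) = ((pre.length - 1 : Nat) : Int) := by omega
  rw [hidx, PySem.List.pyGet?_natCast, List.getElem?_append_left (by omega),
    List.getLast?_eq_getElem?]

-- A's fold over the suffix of pre ++ suf equals the prev-carrying recursion
theorem ajouterFold_eq_goA (suf pre acc : List Char) :
    (PySem.List.enumerate suf (pre.length : Int)).foldl (ajouterStepA (pre ++ suf)) acc
      = acc ++ ajouterGoA pre.getLast? suf := by
  induction suf generalizing pre acc with
  | nil => simp [PySem.List.enumerate_nil, ajouterGoA]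
  | cons c rest ih =>
    rw [PySem.List.enumerate_cons, List.foldl_cons]
    have hrec := ih (pre ++ [c]) (ajouterStepA (pre ++ c :: rest) acc ((pre.length : Int), c))
    rw [show ((pre ++ [c]).length : Int) = (pre.length : Int) + 1 by simp,
      show (pre ++ [c]) ++ rest = pre ++ c :: rest by simp,
      show (pre ++ [c]).getLast? = some c by simp] at hrec
    rw [hrec]
    by_cases hc : c = ' '
    · subst hc
      cases hp : pre with
      | nil => simp [ajouterStepA, ajouterGoA]
      | cons p0 ps =>
        rw [← hp]
        have hne : pre ≠ [] := by rw [hp]; simp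
        have hpos : (0 : Int) < (pre.length : Int) := by
          have := List.length_pos_iff.mpr hne; exact_mod_cast this
        have hget := ajouterPyGet_pre_last pre (' ' :: rest) hne
        have hlp : 0 < pre.length := List.length_pos_iff.mpr hne
        by_cases hlast : pre.getLast? = some ' '
        · simp [ajouterStepA, ajouterGoA, hget, hlast, hne, hlp]
        · simp [ajouterStepA, ajouterGoA, hget, hlast, hlp]
    · simp [ajouterStepA, ajouterGoA, hc]

-- ===== VERDICT (by name: the statement is the Claim_ definition above) =====
theorem ajouter_espaces_entre_mots_spec : Claim_equal_ajouter_espaces_entre_mots := by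
  intro texte _
  show _ = _
  unfold ajouter_espaces_entre_mots ajouter_espaces_entre_mots_alt
  have h := ajouterFold_eq_goA texte.toList [] []
  simp only [List.length_nil, Nat.cast_zero, List.nil_append, List.getLast?_nil] at h
  rw [show (fun resultat (p : Int × Char) =>
        if p.2 = ' ' then
          if p.1 > 0 ∧ PySem.List.pyGet? texte.toList (p.1 - 1) ≠ some ' ' then
            resultat ++ [' ', ' ']
          else if p.1 = 0 then resultat ++ [' ', ' ']
          else resultat
        else resultat ++ [p.2]) = ajouterStepA texte.toList from rfl,
    h, ajouterGoA_eq_altGo texte.toList none (by simp)]
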